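-- pv_equiv track=rewrite | github.com/krab11/code | python/problems/time_to_equality.py | solve
-- ===== SOURCE A (Python) =====
-- def solve(A):
--     max_element = A[0]
--     seconds = 0
--     for each in A[1:]:
--         if each > max_element:
--             max_element = each
--     for each in A:
--         seconds += max_element - each
--     return seconds
-- ===== SOURCE B (Python) =====
-- def solve(A):
--     m = A[0]
--     seconds = 0
--     count = 0
--     for each in A:
--         if each > m:
--             seconds += count * (each - m)
--             m = each
--         seconds += m - each
--         count += 1
--     return seconds
-- ===== Notes on version B (the rewrite author's own statement) =====
-- stated objective: alternative
-- what changed: B computes the answer in a single streaming pass: it keeps a running max, a count and accumulated seconds, and when a larger element appears it retroactively corrects the already-accumulated deficits by count*(new_max - old_max), instead of A's two staged passes (max pass then summation pass).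
-- outside the precondition, e.g. on solve([]): A raises IndexError, B raises IndexError
import Mathlib
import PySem

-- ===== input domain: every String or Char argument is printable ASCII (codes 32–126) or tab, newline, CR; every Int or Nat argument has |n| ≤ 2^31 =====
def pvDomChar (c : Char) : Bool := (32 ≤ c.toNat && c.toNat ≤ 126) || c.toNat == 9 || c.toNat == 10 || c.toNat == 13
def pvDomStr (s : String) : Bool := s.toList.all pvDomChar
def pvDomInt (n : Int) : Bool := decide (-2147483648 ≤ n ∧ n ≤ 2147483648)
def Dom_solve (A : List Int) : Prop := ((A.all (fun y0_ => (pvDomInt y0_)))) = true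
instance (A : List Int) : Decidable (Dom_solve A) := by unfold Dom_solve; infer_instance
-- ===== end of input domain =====

-- B replaces A's two staged passes (find max, then sum deficits) by a single streaming
-- pass with retroactive correction of accumulated deficits when a new max appears.


-- ===== PORT A =====
def solve (A : List Int) : Int :=
  match A with
  | [] => 0  -- A[0] raises IndexError; excluded by Pre_solve
  | a :: rest =>
    let max_element := rest.foldl (fun m e => if e > m then e else m) a
    A.foldl (fun s e => s + (max_element - e)) 0

-- ===== PORT B =====
def solveAltStep (st : Int × Int × Int) (e : Int) : Int × Int × Int :=
  let m := st.1; let seconds := st.2.1; let count := st.2.2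
  let (m', seconds') := if e > m then (e, seconds + count * (e - m)) else (m, seconds)
  (m', seconds' + (m' - e), count + 1)

def solve_alt (A : List Int) : Int :=
  match A with
  | [] => 0  -- A[0] raises IndexError; excluded by Pre_solve
  | a :: _ => (A.foldl solveAltStep (a, 0, 0)).2.1

-- ===== PRECONDITION & SPEC =====
-- Pre_ excludes the empty list, on which both A and B raise IndexError at A[0].
def Pre_solve (A : List Int) : Prop := A ≠ []
instance (A : List Int) : Decidable (Pre_solve A) := by unfold Pre_solve; infer_instance
def pvWitness_solve : List Int := ([1, 3, 2])

def Spec_solve (A : List Int) (out : Int) : Prop := out = solve_alt A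
instance (A : List Int) (out : Int) : Decidable (Spec_solve A out) := by unfold Spec_solve; infer_instance

-- ===== CLAIM (what is proved, stated in full; the proofs are below) =====
def Claim_equal_solve : Prop := ∀ (A : List Int), Dom_solve A → Pre_solve A → Spec_solve A (solve A)

-- ===== LEMMAS AND PROOFS =====

-- A's second loop in closed form.
theorem sum_loop_closed (m : Int) (A : List Int) (s : Int) :
    A.foldl (fun s e => s + (m - e)) s = s + (A.length : Int) * m - A.sum := by
  induction A generalizing s with
  | nil => simp
  | cons a t ih => simp [List.foldl, ih]; ring

-- Invariant of B's streaming loop: from any state (m, c*m - S, c) it reaches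
-- (M, (c+|L|)*M - (S + sum L), c+|L|) with M the running max.
theorem stream_invariant (L : List Int) (m c S : Int) :
    L.foldl solveAltStep (m, c * m - S, c) =
      (L.foldl (fun m e => if e > m then e else m) m,
       (c + (L.length : Int)) * (L.foldl (fun m e => if e > m then e else m) m) - (S + L.sum),
       c + (L.length : Int)) := by
  induction L generalizing m c S with
  | nil => simp
  | cons e t ih =>
    simp only [List.foldl]
    by_cases h : e > m
    · have : solveAltStep (m, c * m - S, c) e = (e, (c+1) * e - (S + e), c + 1) := by
        simp [solveAltStep, h]; ring
      rw [this, ih e (c+1) (S+e)]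
      simp only [if_pos h]
      refine Prod.ext rfl (Prod.ext ?_ ?_) <;> simp <;> ring
    · have : solveAltStep (m, c * m - S, c) e = (m, (c+1) * m - (S + e), c + 1) := by
        simp [solveAltStep, h]; ring
      rw [this, ih m (c+1) (S+e)]
      simp only [if_neg h]
      refine Prod.ext rfl (Prod.ext ?_ ?_) <;> simp <;> ring

-- ===== VERDICT (by name: the statement is the Claim_ definition above) =====
theorem solve_spec : Claim_equal_solve := by
  intro A _ hpre
  unfold Spec_solve solve solve_alt
  match A with
  | [] => exact absurd rfl hpre
  | a :: rest =>
    simp only [List.foldl]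
    have hstep : solveAltStep (a, 0, 0) a = (a, 0, 1) := by
      simp [solveAltStep]
    have h0 : (0 : Int) = 1 * a - a := by ring
    rw [hstep, sum_loop_closed, h0, stream_invariant]
    simp
    ring
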